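-- pv_equiv track=rewrite | github.com/yiyangxu1998/SparseEmbed | build_test_local_with_ngram.py | tokens2sparse
-- ===== SOURCE A (Python) =====
-- def tokens2sparse(vocab, tokens):
--     """
--     Given a String of words converts the String to continuous vector representation according to its token frequencies.
--     :param vocab:
--     :param tokens:
--     :return:
--     """
--     token_sparse = {}
--     for w in tokens:
--         for i, token in enumerate(vocab):
--             if token == w:
--                 if i in token_sparse:
--                     token_sparse[i] += 1
--                 else:
--                     token_sparse[i] = 1
--     return token_sparse
-- ===== SOURCE B (Python) =====
-- def tokens2sparse(vocab, tokens):
--     """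
--     Given a String of words converts the String to continuous vector representation according to its token frequencies.
--     :param vocab:
--     :param tokens:
--     :return:
--     """
--     index = {}
--     for i, t in enumerate(vocab):
--         index.setdefault(t, []).append(i)
--     token_sparse = {}
--     for w in tokens:
--         for i in index.get(w, []):
--             token_sparse[i] = token_sparse.get(i, 0) + 1
--     return token_sparse
-- ===== Notes on version B (the rewrite author's own statement) =====
-- stated objective: faster
-- what changed: B precomputes a dict mapping each vocab token to its list of indices in one pass over vocab, then counts with one pass over tokens, replacing A's inner scan of the whole vocab for every token.
import Mathlib
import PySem

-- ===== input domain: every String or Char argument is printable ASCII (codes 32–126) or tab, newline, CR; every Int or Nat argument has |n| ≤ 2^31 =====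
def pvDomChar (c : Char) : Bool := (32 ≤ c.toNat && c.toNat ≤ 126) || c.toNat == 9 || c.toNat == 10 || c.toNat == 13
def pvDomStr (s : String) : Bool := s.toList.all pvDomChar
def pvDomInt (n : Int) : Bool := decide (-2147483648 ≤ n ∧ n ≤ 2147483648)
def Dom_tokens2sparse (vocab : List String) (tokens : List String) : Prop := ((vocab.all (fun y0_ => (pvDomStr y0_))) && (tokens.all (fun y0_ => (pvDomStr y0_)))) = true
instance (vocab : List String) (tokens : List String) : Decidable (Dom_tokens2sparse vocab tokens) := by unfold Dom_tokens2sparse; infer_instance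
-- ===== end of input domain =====

-- B replaces A's inner scan of vocab per token by a precomputed token→indices dict (one pass each); asymptotically faster.

-- ===== PORT A =====
def tokens2sparse (vocab : List String) (tokens : List String) : List (Int × Int) :=
  (tokens.foldl (fun d w =>
      (PySem.List.enumerate vocab).foldl (fun d p =>
        if p.2 == w then
          (if d.contains p.1 then d.modify p.1 0 (· + 1) else d.insert p.1 1)
        else d) d)
    (PySem.Dict.empty : PySem.Dict Int Int)).items

-- ===== PORT B =====
-- 'index.setdefault(t, []).append(i)' is ported as 'modify t [] (· ++ [i])' (exact: get-or-default then append in place).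
def tokens2sparse_alt (vocab : List String) (tokens : List String) : List (Int × Int) :=
  let index : PySem.Dict String (List Int) :=
    (PySem.List.enumerate vocab).foldl (fun d p => d.modify p.2 [] (· ++ [p.1])) PySem.Dict.empty
  (tokens.foldl (fun d w =>
      (index.getD w []).foldl (fun d i => d.insert i (d.getD i 0 + 1)) d)
    (PySem.Dict.empty : PySem.Dict Int Int)).items

-- ===== PRECONDITION & SPEC =====
def Spec_tokens2sparse (vocab : List String) (tokens : List String) (out : List (Int × Int)) : Prop := out = tokens2sparse_alt vocab tokens
instance (vocab : List String) (tokens : List String) (out : List (Int × Int)) : Decidable (Spec_tokens2sparse vocab tokens out) := by unfold Spec_tokens2sparse; infer_instance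

-- ===== CLAIM (what is proved, stated in full; the proofs are below) =====
def Claim_equal_tokens2sparse : Prop := ∀ (vocab : List String) (tokens : List String), Dom_tokens2sparse vocab tokens → Spec_tokens2sparse vocab tokens (tokens2sparse vocab tokens)

-- ===== LEMMAS AND PROOFS =====

-- B's precomputed index looked up at w gives exactly the vocab positions holding w, in order.
lemma index_getD (vocab : List String) (w : String) :
    ((PySem.List.enumerate vocab).foldl (fun d p => d.modify p.2 [] (· ++ [p.1]))
        (PySem.Dict.empty : PySem.Dict String (List Int))).getD w []
      = (((PySem.List.enumerate vocab).filter (fun p => p.2 == w)).map (·.1)) := by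
  have h := PySem.Dict.getD_foldl_modify_append
    (l := (PySem.List.enumerate vocab).map (fun p => (p.2, p.1)))
    (d := (PySem.Dict.empty : PySem.Dict String (List Int))) (c := w)
  simpa [List.foldl_map, List.filter_map, List.map_map, Function.comp] using h

-- A's check-then-modify/insert update is B's single insert of getD+1.
lemma upd_eq (d : PySem.Dict Int Int) (i : Int) :
    (if d.contains i then d.modify i 0 (· + 1) else d.insert i 1) = d.insert i (d.getD i 0 + 1) := by
  by_cases h : d.contains i
  · simp [h, PySem.Dict.modify]
  · have h' : d.contains i = false := by simpa using h
    rw [PySem.Dict.getD_of_not_contains (h := h')]; simp [h]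

-- A's guarded inner scan equals B's plain fold over the matching positions.
lemma filter_fold (w : String) (l : List (Int × String)) (d : PySem.Dict Int Int) :
    l.foldl (fun d p =>
        if p.2 == w then
          (if d.contains p.1 then d.modify p.1 0 (· + 1) else d.insert p.1 1)
        else d) d
      = ((l.filter (fun p => p.2 == w)).map (·.1)).foldl
          (fun d i => d.insert i (d.getD i 0 + 1)) d := by
  induction l generalizing d with
  | nil => rfl
  | cons p rest ih =>
    rw [List.foldl_cons, List.filter_cons]
    by_cases h : (p.2 == w) = true
    · rw [if_pos h, if_pos h, List.map_cons, List.foldl_cons, upd_eq]; exact ih _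
    · rw [if_neg h, if_neg h]; exact ih _

-- ===== VERDICT (by name: the statement is the Claim_ definition above) =====
theorem tokens2sparse_spec : Claim_equal_tokens2sparse := by
  intro vocab tokens _
  unfold Spec_tokens2sparse tokens2sparse tokens2sparse_alt
  congr 1
  apply PySem.List.foldl_congr_mem
  intro d w _
  rw [index_getD, filter_fold]
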